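-- pv_equiv track=rewrite | github.com/xinfuwcx/DeepCAD | example2/tools/analyze_anchors.py | estimate_rods
-- ===== SOURCE A (Python) =====
-- def estimate_rods(comps, adj):
--     rods = 0
--     endpoints_total = 0
--     segs_per_comp = []
--     for comp in comps:
--         deg1 = sum(1 for n in comp if len(adj[n]) == 1)
--         endpoints_total += deg1
--         # edges in comp
--         edge_count = sum(len(adj[n]) for n in comp) // 2
--         segs_per_comp.append(edge_count)
--         if deg1 >= 2:
--             rods += deg1 // 2
--         elif edge_count > 0:
--             rods += 1
--     return rods, endpoints_total, segs_per_comp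
-- ===== SOURCE B (Python) =====
-- def estimate_rods(comps, adj):
--     def stats(nodes):
--         d = s = 0
--         for n in nodes:
--             k = len(adj[n])
--             s += k
--             if k == 1:
--                 d += 1
--         return d, s // 2
--
--     def solve(cs):
--         if not cs:
--             return 0, 0, []
--         if len(cs) == 1:
--             d, e = stats(cs[0])
--             rod = d // 2 if d >= 2 else (1 if e > 0 else 0)
--             return rod, d, [e]
--         mid = len(cs) // 2
--         r1, t1, s1 = solve(cs[:mid])
--         r2, t2, s2 = solve(cs[mid:])
--         return r1 + r2, t1 + t2, s1 + s2
--
--     return solve(comps)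
-- ===== Notes on version B (the rewrite author's own statement) =====
-- stated objective: alternative
-- what changed: Replaces A's single fused left-to-right accumulation loop by a divide-and-conquer recursion: split the component list in half, solve each half independently, and merge the two triples; per-component stats are computed in one manual pass instead of A's two generator scans.
import Mathlib
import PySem

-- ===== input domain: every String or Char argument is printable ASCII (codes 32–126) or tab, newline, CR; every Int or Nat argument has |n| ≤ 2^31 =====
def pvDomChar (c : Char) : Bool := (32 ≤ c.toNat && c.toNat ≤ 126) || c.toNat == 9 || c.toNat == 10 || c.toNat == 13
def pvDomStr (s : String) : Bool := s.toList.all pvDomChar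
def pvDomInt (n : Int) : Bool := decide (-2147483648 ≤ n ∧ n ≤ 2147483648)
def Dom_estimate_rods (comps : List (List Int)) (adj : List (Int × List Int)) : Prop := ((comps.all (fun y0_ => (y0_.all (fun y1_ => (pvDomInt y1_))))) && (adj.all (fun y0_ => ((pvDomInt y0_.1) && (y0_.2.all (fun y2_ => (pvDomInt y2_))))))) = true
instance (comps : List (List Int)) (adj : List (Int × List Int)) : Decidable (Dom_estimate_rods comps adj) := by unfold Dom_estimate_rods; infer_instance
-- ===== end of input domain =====

-- B replaces A's fused left-to-right accumulation loop by divide-and-conquer on the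
-- component list (solve halves, merge triples), with per-component stats in one pass
-- (alternative decomposition, same value).
-- NOTE: adj[n] is a dict lookup; under Pre_ every looked-up key is present, so
-- Dict.getD with an (unreachable) default [] is exact there.

-- ===== PORT A =====
def estimate_rods (comps : List (List Int)) (adj : List (Int × List Int)) : Int × Int × List Int :=
  comps.foldl (fun acc comp =>
    let deg1 : Int := comp.foldl (fun s n =>
      if (((PySem.Dict.mk adj).getD n []).length : Int) = 1 then s + 1 else s) 0
    let edge_count : Int := PySem.Int.floordiv
      (comp.foldl (fun s n => s + (((PySem.Dict.mk adj).getD n []).length : Int)) 0) 2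
    let rods' : Int :=
      if deg1 ≥ 2 then acc.1 + PySem.Int.floordiv deg1 2
      else if edge_count > 0 then acc.1 + 1 else acc.1
    (rods', acc.2.1 + deg1, acc.2.2 ++ [edge_count])) (0, 0, [])

-- ===== PORT B =====
-- B's helper `stats`: one pass over the nodes maintaining (d, s) together.
def pvStats (adj : List (Int × List Int)) (nodes : List Int) : Int × Int :=
  let p := nodes.foldl (fun (ds : Int × Int) n =>
    let k : Int := (((PySem.Dict.mk adj).getD n []).length : Int)
    (if k = 1 then ds.1 + 1 else ds.1, ds.2 + k)) (0, 0)
  (p.1, PySem.Int.floordiv p.2 2)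

-- B's helper `solve`: divide and conquer on the component list.
def pvSolve (adj : List (Int × List Int)) : List (List Int) → Int × Int × List Int
  | [] => (0, 0, [])
  | [c] =>
      let de := pvStats adj c
      (if de.1 ≥ 2 then PySem.Int.floordiv de.1 2 else if de.2 > 0 then 1 else 0, de.1, [de.2])
  | c1 :: c2 :: rest =>
      let cs := c1 :: c2 :: rest
      let mid := cs.length / 2
      let l := pvSolve adj (cs.take mid)
      let r := pvSolve adj (cs.drop mid)
      (l.1 + r.1, l.2.1 + r.2.1, l.2.2 ++ r.2.2)
termination_by cs => cs.length
decreasing_by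
  · simp [List.length_take]; omega
  · simp [List.length_drop]; omega

def estimate_rods_alt (comps : List (List Int)) (adj : List (Int × List Int)) : Int × Int × List Int :=
  pvSolve adj comps

-- ===== PRECONDITION & SPEC =====
-- Pre_: every node of every component is a key of adj (otherwise Python's adj[n] raises KeyError).
def Pre_estimate_rods (comps : List (List Int)) (adj : List (Int × List Int)) : Prop :=
  (comps.all (fun comp => comp.all (fun n => (PySem.Dict.mk adj).contains n))) = true
instance (comps : List (List Int)) (adj : List (Int × List Int)) : Decidable (Pre_estimate_rods comps adj) := by unfold Pre_estimate_rods; infer_instance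

def pvWitness_estimate_rods : List (List Int) × (List (Int × List Int)) :=
  ([[0, 1], [2]], [(0, [1]), (1, [0]), (2, [])])

def Spec_estimate_rods (comps : List (List Int)) (adj : List (Int × List Int)) (out : Int × Int × List Int) : Prop := out = estimate_rods_alt comps adj
instance (comps : List (List Int)) (adj : List (Int × List Int)) (out : Int × Int × List Int) : Decidable (Spec_estimate_rods comps adj out) := by unfold Spec_estimate_rods; infer_instance

-- ===== CLAIM (what is proved, stated in full; the proofs are below) =====
def Claim_equal_estimate_rods : Prop := ∀ (comps : List (List Int)) (adj : List (Int × List Int)), Dom_estimate_rods comps adj → Pre_estimate_rods comps adj → Spec_estimate_rods comps adj (estimate_rods comps adj)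

-- ===== LEMMAS AND PROOFS =====

-- Linear "model" of the result, used only to relate the two ports.
def pvModel (adj : List (Int × List Int)) (cs : List (List Int)) : Int × Int × List Int :=
  ((cs.map (fun c => let de := pvStats adj c
      if de.1 ≥ 2 then PySem.Int.floordiv de.1 2 else if de.2 > 0 then (1 : Int) else 0)).sum,
   (cs.map (fun c => (pvStats adj c).1)).sum,
   cs.map (fun c => (pvStats adj c).2))

lemma pvModel_append (adj : List (Int × List Int)) (xs ys : List (List Int)) :
    pvModel adj (xs ++ ys) =
      ((pvModel adj xs).1 + (pvModel adj ys).1,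
       (pvModel adj xs).2.1 + (pvModel adj ys).2.1,
       (pvModel adj xs).2.2 ++ (pvModel adj ys).2.2) := by
  simp [pvModel]

-- B's divide-and-conquer computes the linear model.
lemma pvSolve_eq_model (adj : List (Int × List Int)) (cs : List (List Int)) :
    pvSolve adj cs = pvModel adj cs := by
  induction cs using pvSolve.induct adj with
  | case1 => rw [pvSolve]; rfl
  | case2 c => rw [pvSolve]; simp [pvModel]
  | case3 c1 c2 rest cs mid ih1 ih2 =>
    rw [pvSolve]
    rw [ih1, ih2]
    have h := pvModel_append adj ((c1 :: c2 :: rest).take ((c1 :: c2 :: rest).length / 2))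
      ((c1 :: c2 :: rest).drop ((c1 :: c2 :: rest).length / 2))
    rw [List.take_append_drop] at h
    rw [h]

-- A's per-comp deg1 count equals B's paired fold, first component.
lemma pvStats_fst (adj : List (Int × List Int)) (c : List Int) (d s : Int) :
    c.foldl (fun (ds : Int × Int) n =>
      let k : Int := (((PySem.Dict.mk adj).getD n []).length : Int)
      (if k = 1 then ds.1 + 1 else ds.1, ds.2 + k)) (d, s)
    = (c.foldl (fun a n =>
        if (((PySem.Dict.mk adj).getD n []).length : Int) = 1 then a + 1 else a) d,
       c.foldl (fun a n => a + (((PySem.Dict.mk adj).getD n []).length : Int)) s) := by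
  induction c generalizing d s with
  | nil => rfl
  | cons x xs ih => simp only [List.foldl_cons]; rw [ih]

-- A's fused loop, started from any accumulator, equals that accumulator extended by the model.
lemma estimate_rods_loop (adj : List (Int × List Int)) (comps : List (List Int))
    (r e : Int) (s : List Int) :
    comps.foldl (fun acc comp =>
      let deg1 : Int := comp.foldl (fun s n =>
        if (((PySem.Dict.mk adj).getD n []).length : Int) = 1 then s + 1 else s) 0
      let edge_count : Int := PySem.Int.floordiv
        (comp.foldl (fun s n => s + (((PySem.Dict.mk adj).getD n []).length : Int)) 0) 2
      let rods' : Int :=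
        if deg1 ≥ 2 then acc.1 + PySem.Int.floordiv deg1 2
        else if edge_count > 0 then acc.1 + 1 else acc.1
      (rods', acc.2.1 + deg1, acc.2.2 ++ [edge_count])) (r, e, s)
    = (r + (pvModel adj comps).1, e + (pvModel adj comps).2.1, s ++ (pvModel adj comps).2.2) := by
  induction comps generalizing r e s with
  | nil => simp [pvModel]
  | cons c cs ih =>
    simp only [List.foldl_cons]
    rw [ih]
    have hst : pvStats adj c =
        (c.foldl (fun a n =>
          if (((PySem.Dict.mk adj).getD n []).length : Int) = 1 then a + 1 else a) 0,
         PySem.Int.floordiv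
          (c.foldl (fun a n => a + (((PySem.Dict.mk adj).getD n []).length : Int)) 0) 2) := by
      simp only [pvStats, pvStats_fst]
    simp only [pvModel, List.map_cons, List.sum_cons] at *
    refine Prod.ext ?_ (Prod.ext ?_ ?_) <;> simp [hst]
    · split_ifs <;> ring
    · ring

-- ===== VERDICT (by name: the statement is the Claim_ definition above) =====
theorem estimate_rods_spec : Claim_equal_estimate_rods := by
  intro comps adj _ _
  unfold Spec_estimate_rods estimate_rods estimate_rods_alt
  rw [estimate_rods_loop, pvSolve_eq_model]
  simp [pvModel]
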